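-- pv_equiv track=rewrite | github.com/weertman/starBoard | src/data/legacy_morphometric_merge.py | _resolve_location
-- ===== SOURCE A (Python) =====
-- from typing import Any, Dict, Iterable, List, Optional, Sequence, Tuple
--
-- def _resolve_location(
--     gallery_id: str,
--     rows_for_id: Sequence[Dict[str, str]],
--     location_hint: str,
-- ) -> str:
--     exact_matches = [
--         (row.get("location") or "").strip()
--         for row in rows_for_id
--         if (row.get("location") or "").strip() == location_hint
--     ]
--     if exact_matches:
--         return exact_matches[-1]
--     if location_hint:
--         return location_hint
--     locations = [(row.get("location") or "").strip() for row in rows_for_id if (row.get("location") or "").strip()]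
--     return locations[-1] if locations else ""
-- ===== SOURCE B (Python) =====
-- def _resolve_location(gallery_id, rows_for_id, location_hint):
--     if location_hint:
--         return location_hint
--     for row in reversed(rows_for_id):
--         loc = (row.get("location") or "").strip()
--         if loc:
--             return loc
--     return ""
-- ===== Notes on version B (the rewrite author's own statement) =====
-- stated objective: simpler
-- what changed: B returns a non-empty hint immediately and otherwise scans the rows backwards once, returning the first non-blank stripped location, instead of A's two list comprehensions and exact-match machinery.
-- intended difference: When the hint is empty and the rows contain both a blank and a non-blank location, A returns "" because the empty hint exact-matches the blank locations; B returns the last non-blank stripped location, which is the intended resolution of a location from the rows. — e.g. on _resolve_location("g", [[("location", "")], [("location", "X")]], ""): A returns "", B returns "X"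
import Mathlib
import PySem

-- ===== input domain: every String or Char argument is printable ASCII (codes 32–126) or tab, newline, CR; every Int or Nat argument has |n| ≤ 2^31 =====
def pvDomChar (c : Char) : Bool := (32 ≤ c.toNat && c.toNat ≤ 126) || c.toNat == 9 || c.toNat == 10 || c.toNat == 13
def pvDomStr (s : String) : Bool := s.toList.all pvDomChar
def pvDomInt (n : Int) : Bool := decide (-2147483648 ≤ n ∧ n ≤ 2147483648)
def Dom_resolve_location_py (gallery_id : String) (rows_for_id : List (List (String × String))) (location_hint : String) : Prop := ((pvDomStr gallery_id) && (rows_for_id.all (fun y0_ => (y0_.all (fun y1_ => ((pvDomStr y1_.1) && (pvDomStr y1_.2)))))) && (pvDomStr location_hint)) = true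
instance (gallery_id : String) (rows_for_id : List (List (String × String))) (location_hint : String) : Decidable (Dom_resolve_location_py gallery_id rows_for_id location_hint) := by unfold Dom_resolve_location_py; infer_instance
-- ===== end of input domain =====

-- B returns a non-empty hint at once and otherwise scans the rows backwards for the first
-- non-blank stripped location (simpler decomposition); it intentionally differs from A on the
-- D_ inputs below, where A's empty hint accidentally exact-matches blank locations.

-- (row.get("location") or "").strip()
def pvStripLoc (row : List (String × String)) : String :=
  PySem.Str.strip (((PySem.Dict.mk row).get? "location").getD "")

-- ===== PORT A =====
def resolve_location_py (gallery_id : String) (rows_for_id : List (List (String × String))) (location_hint : String) : String :=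
  let exact_matches := (rows_for_id.filter (fun row => pvStripLoc row == location_hint)).map pvStripLoc
  match exact_matches.getLast? with
  | some v => v
  | none =>
    if location_hint ≠ "" then location_hint
    else
      let locations := (rows_for_id.filter (fun row => pvStripLoc row ≠ "")).map pvStripLoc
      match locations.getLast? with
      | some v => v
      | none => ""

-- ===== PORT B =====
-- the reversed-rows loop of Source B
def pvAltLoop : List (List (String × String)) → String
  | [] => ""
  | r :: rs => let loc := pvStripLoc r; if loc ≠ "" then loc else pvAltLoop rs

def resolve_location_py_alt (gallery_id : String) (rows_for_id : List (List (String × String))) (location_hint : String) : String :=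
  if location_hint ≠ "" then location_hint
  else pvAltLoop rows_for_id.reverse

-- ===== PRECONDITION & SPEC =====
-- With an empty hint A exact-matches the blank locations, so whenever some row's location
-- strips to "" while another strips to a non-blank value, A returns "" although a usable
-- location is present; B returns the last non-blank stripped location, the intended value.
def D_resolve_location_py (gallery_id : String) (rows_for_id : List (List (String × String))) (location_hint : String) : Prop :=
  location_hint = "" ∧
  (∃ r ∈ rows_for_id, PySem.Str.strip (((PySem.Dict.mk r).get? "location").getD "") = "") ∧
  (∃ r ∈ rows_for_id, PySem.Str.strip (((PySem.Dict.mk r).get? "location").getD "") ≠ "")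
instance (gallery_id : String) (rows_for_id : List (List (String × String))) (location_hint : String) : Decidable (D_resolve_location_py gallery_id rows_for_id location_hint) := by unfold D_resolve_location_py; infer_instance

def Spec_resolve_location_py (gallery_id : String) (rows_for_id : List (List (String × String))) (location_hint : String) (out : String) : Prop := ¬ D_resolve_location_py gallery_id rows_for_id location_hint → out = resolve_location_py_alt gallery_id rows_for_id location_hint
instance (gallery_id : String) (rows_for_id : List (List (String × String))) (location_hint : String) (out : String) : Decidable (Spec_resolve_location_py gallery_id rows_for_id location_hint out) := by unfold Spec_resolve_location_py; infer_instance

def pvDiffWitness_resolve_location_py : String × (List (List (String × String))) × String :=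
  ("g", [[("location", "")], [("location", "X")]], "")
def pvDiffWitnessOut_resolve_location_py : String × String := ("", "X")

-- ===== CLAIM =====
def Claim_unchanged_resolve_location_py : Prop := ∀ (gallery_id : String) (rows_for_id : List (List (String × String))) (location_hint : String), Dom_resolve_location_py gallery_id rows_for_id location_hint → Spec_resolve_location_py gallery_id rows_for_id location_hint (resolve_location_py gallery_id rows_for_id location_hint)
def Claim_changed_resolve_location_py : Prop := Dom_resolve_location_py (pvDiffWitness_resolve_location_py.1) (pvDiffWitness_resolve_location_py.2.1) (pvDiffWitness_resolve_location_py.2.2) ∧ D_resolve_location_py (pvDiffWitness_resolve_location_py.1) (pvDiffWitness_resolve_location_py.2.1) (pvDiffWitness_resolve_location_py.2.2) ∧ resolve_location_py (pvDiffWitness_resolve_location_py.1) (pvDiffWitness_resolve_location_py.2.1) (pvDiffWitness_resolve_location_py.2.2) = pvDiffWitnessOut_resolve_location_py.1 ∧ resolve_location_py_alt (pvDiffWitness_resolve_location_py.1) (pvDiffWitness_resolve_location_py.2.1) (pvDiffWitness_resolve_location_py.2.2) = pvDiffWitnessOut_resolve_location_py.2 ∧ pvDiffWitnessOut_resolve_location_py.1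 ≠ pvDiffWitnessOut_resolve_location_py.2
def Claim_exact_resolve_location_py : Prop := ∀ (gallery_id : String) (rows_for_id : List (List (String × String))) (location_hint : String), Dom_resolve_location_py gallery_id rows_for_id location_hint → D_resolve_location_py gallery_id rows_for_id location_hint → resolve_location_py gallery_id rows_for_id location_hint ≠ resolve_location_py_alt gallery_id rows_for_id location_hint

-- ===== LEMMAS AND PROOFS =====

-- every element of A's exact_matches list equals the hint
theorem mem_exact_eq (rows : List (List (String × String))) (hint : String) (x : String)
    (hx : x ∈ (rows.filter (fun row => pvStripLoc row == hint)).map pvStripLoc) : x = hint := by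
  rcases List.mem_map.1 hx with ⟨r, hr, rfl⟩
  have := List.of_mem_filter hr
  simpa using this

theorem getLast?_of_all_eq {α : Type} (l : List α) (c : α) (h : ∀ x ∈ l, x = c) :
    l.getLast? = some c ∨ l.getLast? = none := by
  cases hl : l.getLast? with
  | none => exact Or.inr rfl
  | some v =>
    left
    have hv : v ∈ l := List.mem_of_getLast? hl
    rw [h v hv]

-- B's backwards loop = head of the filtered-and-stripped reversed rows
theorem pvAltLoop_eq (m : List (List (String × String))) :
    pvAltLoop m = ((((m.filter (fun r => pvStripLoc r ≠ "")).map pvStripLoc).head?).getD "") := by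
  induction m with
  | nil => rfl
  | cons r rs ih =>
    by_cases h : pvStripLoc r = ""
    · simp [pvAltLoop, h, ih]
    · simp [pvAltLoop, h]

-- hence B (empty hint) = the last non-blank stripped location of the rows
theorem alt_empty_hint (g : String) (rows : List (List (String × String))) :
    resolve_location_py_alt g rows "" =
      ((((rows.filter (fun r => pvStripLoc r ≠ "")).map pvStripLoc).getLast?).getD "") := by
  show pvAltLoop rows.reverse = _
  rw [pvAltLoop_eq, List.filter_reverse, List.map_reverse, List.head?_reverse]

-- ===== VERDICT =====
theorem resolve_location_py_spec : Claim_unchanged_resolve_location_py := by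
  intro g rows hint _ hD
  unfold resolve_location_py
  by_cases hh : hint = ""
  · subst hh
    simp only [ne_eq, not_true_eq_false, if_false]
    by_cases hblank : ∃ r ∈ rows, pvStripLoc r = ""
    · -- ¬D forces every stripped location to be blank
      have hall : ∀ r ∈ rows, pvStripLoc r = "" := by
        intro r hr
        by_contra hne
        exact hD ⟨rfl, hblank, ⟨r, hr, hne⟩⟩
      rcases hblank with ⟨r0, hr0, hr0b⟩
      have hmemA : pvStripLoc r0 ∈ (rows.filter (fun row => pvStripLoc row == "")).map pvStripLoc :=
        List.mem_map.2 ⟨r0, List.mem_filter.2 ⟨hr0, by simp [hr0b]⟩, rfl⟩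
      rcases getLast?_of_all_eq _ "" (mem_exact_eq rows "") with hsome | hnone
      · rw [hsome]
        have hfil : rows.filter (fun r => pvStripLoc r ≠ "") = [] := by
          rw [List.filter_eq_nil_iff]
          intro r hr
          simp [hall r hr]
        rw [alt_empty_hint, hfil]
        rfl
      · have := List.getLast?_eq_none_iff.1 hnone
        simp [this] at hmemA
    · -- no blank stripped location: exact_matches is empty, the locations filter keeps all rows
      have hempty : ((rows.filter (fun row => pvStripLoc row == "")).map pvStripLoc) = [] := by
        rw [List.map_eq_nil_iff, List.filter_eq_nil_iff]
        intro r hr hbeq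
        exact hblank ⟨r, hr, by simpa using hbeq⟩
      rw [hempty, alt_empty_hint]
      show (match ((rows.filter (fun r => pvStripLoc r ≠ "")).map pvStripLoc).getLast? with
            | some v => v | none => "") = _
      cases ((rows.filter (fun r => pvStripLoc r ≠ "")).map pvStripLoc).getLast? <;> simp
  · -- non-empty hint: both sides return the hint
    rcases getLast?_of_all_eq _ hint (mem_exact_eq rows hint) with hsome | hnone
    · simp [hsome, resolve_location_py_alt, hh]
    · simp [hnone, resolve_location_py_alt, hh]

theorem resolve_location_py_changed : Claim_changed_resolve_location_py := by
  unfold Claim_changed_resolve_location_py; decide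

theorem resolve_location_py_tight : Claim_exact_resolve_location_py := by
  intro g rows hint _ hD
  rcases hD with ⟨hh, ⟨r0, hr0, hr0b⟩, ⟨r1, hr1, hr1ne⟩⟩
  subst hh
  replace hr0b : pvStripLoc r0 = "" := hr0b
  replace hr1ne : pvStripLoc r1 ≠ "" := hr1ne
  -- A returns ""
  have hmemA : pvStripLoc r0 ∈ (rows.filter (fun row => pvStripLoc row == "")).map pvStripLoc :=
    List.mem_map.2 ⟨r0, List.mem_filter.2 ⟨hr0, by simp [hr0b]⟩, rfl⟩
  have hA : resolve_location_py g rows "" = "" := by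
    unfold resolve_location_py
    rcases getLast?_of_all_eq _ "" (mem_exact_eq rows "") with hsome | hnone
    · simp [hsome]
    · have := List.getLast?_eq_none_iff.1 hnone
      simp [this] at hmemA
  -- B returns a non-blank location
  have hB : resolve_location_py_alt g rows "" ≠ "" := by
    rw [alt_empty_hint]
    have hmem : pvStripLoc r1 ∈ (rows.filter (fun r => pvStripLoc r ≠ "")).map pvStripLoc :=
      List.mem_map.2 ⟨r1, List.mem_filter.2 ⟨hr1, by simpa using hr1ne⟩, rfl⟩
    cases hl : ((rows.filter (fun r => pvStripLoc r ≠ "")).map pvStripLoc).getLast? with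
    | none =>
      have hnil := List.getLast?_eq_none_iff.1 hl
      rw [hnil] at hmem
      simp at hmem
    | some v =>
      have hv : v ∈ (rows.filter (fun r => pvStripLoc r ≠ "")).map pvStripLoc :=
        List.mem_of_getLast? hl
      rcases List.mem_map.1 hv with ⟨r, hrf, rfl⟩
      have := List.of_mem_filter hrf
      simpa using this
  rw [hA]
  exact fun h => hB h.symm
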